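-- pv_equiv track=rewrite | github.com/michalgierkowski/Python | projects/Random Projects/Password analyzer.py | check_password_rules
-- ===== SOURCE A (Python) =====
-- def check_password_rules(password_details):
--
--
--     password_scores = []
--     special_chars = {"!", "@", "#", "$", "%", "^", "&", "*", "(", ")", "_", "-", "+", "="}
--
--
--     for password in password_details:
--         score = 0 # stores a new score for each loop (for each password in list)
--
--         if 8 <= len(password) < 64:
--             score += 1
--
--         # any() function new concept- if ANY of X in X (in this code atleast) give a score
--
--         if any(char.isupper() for char in password): # checks if atleast 1 character is upper
--             score += 1
--
--         if any(char.islower() for char in password):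
--             score += 1
--
--         if any(char.isdigit() for char in password):
--             score += 1
--
--         if any(char in special_chars for char in password):
--             score += 1
--
--         password_scores.append((password, score))  # stored as tuple, unchangeable and great for groups of value (like pairs)
--
--     return password_scores
-- ===== SOURCE B (Python) =====
-- def check_password_rules(password_details):
--     special_chars = {"!", "@", "#", "$", "%", "^", "&", "*", "(", ")", "_", "-", "+", "="}
--
--     def score_one(password):
--         has_upper = has_lower = has_digit = has_special = False
--         for char in password:
--             if char.isupper():
--                 has_upper = True
--             if char.islower():
--                 has_lower = True
--             if char.isdigit():
--                 has_digit = True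
--             if char in special_chars:
--                 has_special = True
--         band = 1 if 8 <= len(password) < 64 else 0
--         return band + has_upper + has_lower + has_digit + has_special
--
--     return [(p, score_one(p)) for p in password_details]
-- ===== Notes on version B (the rewrite author's own statement) =====
-- stated objective: simpler
-- what changed: Replaces the five separate any() generator scans per password with one inner loop that accumulates four character-class flags in a single pass, then computes the score arithmetically from the length band and the flags; the result list is built by a comprehension over a per-password scoring helper instead of appends in an outer loop.
import Mathlib
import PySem

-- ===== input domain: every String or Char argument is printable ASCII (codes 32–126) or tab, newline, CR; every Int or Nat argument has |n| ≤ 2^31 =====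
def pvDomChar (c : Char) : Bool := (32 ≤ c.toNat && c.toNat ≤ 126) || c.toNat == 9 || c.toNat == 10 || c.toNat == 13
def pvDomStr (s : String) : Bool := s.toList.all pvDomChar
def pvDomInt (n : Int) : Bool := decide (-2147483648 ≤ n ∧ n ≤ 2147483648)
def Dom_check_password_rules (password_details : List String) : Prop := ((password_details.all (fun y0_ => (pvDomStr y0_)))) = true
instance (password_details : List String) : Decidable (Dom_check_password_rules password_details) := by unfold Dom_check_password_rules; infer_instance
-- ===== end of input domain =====

-- ===== PORT A =====
-- B replaces the five any() scans per password with a single character loop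
-- accumulating four flags, then computes the score from the flags (objective: simpler).
-- Python's set of fourteen 1-character special strings is ported as a list of the
-- fourteen characters; 'char in special_chars' is pvIsSpecial, membership in that
-- list (exact, since every element is a single character).
def pvSpecialChars : List Char :=
  ['!', '@', '#', '$', '%', '^', '&', '*', '(', ')', '_', '-', '+', '=']

def pvIsSpecial (char : Char) : Bool := pvSpecialChars.contains char

def check_password_rules (password_details : List String) : List (String × Int) :=
  password_details.foldl (fun password_scores password =>
    let cs := password.toList
    let score : Int := 0
    let score := if 8 ≤ cs.length ∧ cs.length < 64 then score + 1 else score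
    let score := if cs.any (fun char => PySem.Chars.isupper char) then score + 1 else score
    let score := if cs.any (fun char => PySem.Chars.islower char) then score + 1 else score
    let score := if cs.any (fun char => PySem.Chars.isdigit char) then score + 1 else score
    let score := if cs.any (fun char => pvIsSpecial char) then score + 1 else score
    password_scores ++ [(password, score)]) []

-- ===== PORT B =====
def pvScoreOne (password : String) : Int :=
  let cs := password.toList
  let flags := cs.foldl
    (fun (st : Bool × Bool × Bool × Bool) char =>
      let st := if PySem.Chars.isupper char then (true, st.2.1, st.2.2.1, st.2.2.2) else st
      let st := if PySem.Chars.islower char then (st.1, true, st.2.2.1, st.2.2.2) else st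
      let st := if PySem.Chars.isdigit char then (st.1, st.2.1, true, st.2.2.2) else st
      let st := if pvIsSpecial char then (st.1, st.2.1, st.2.2.1, true) else st
      st)
    (false, false, false, false)
  let band : Int := if 8 ≤ cs.length ∧ cs.length < 64 then 1 else 0
  band + (if flags.1 then 1 else 0) + (if flags.2.1 then 1 else 0)
       + (if flags.2.2.1 then 1 else 0) + (if flags.2.2.2 then 1 else 0)

def check_password_rules_alt (password_details : List String) : List (String × Int) :=
  password_details.map (fun p => (p, pvScoreOne p))

-- ===== PRECONDITION & SPEC =====
def Spec_check_password_rules (password_details : List String) (out : List (String × Int)) : Prop := out = check_password_rules_alt password_details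
instance (password_details : List String) (out : List (String × Int)) : Decidable (Spec_check_password_rules password_details out) := by unfold Spec_check_password_rules; infer_instance

-- ===== CLAIM (what is proved, stated in full; the proofs are below) =====
def Claim_equal_check_password_rules : Prop := ∀ (password_details : List String), Dom_check_password_rules password_details → Spec_check_password_rules password_details (check_password_rules password_details)

-- ===== LEMMAS AND PROOFS =====
set_option maxHeartbeats 1000000 in

-- the flag loop computes "initial flag OR some character matches", for each flag
theorem pvFlags_eq (cs : List Char) (u l d s : Bool) :
    cs.foldl
      (fun (st : Bool × Bool × Bool × Bool) char =>
        let st := if PySem.Chars.isupper char then (true, st.2.1, st.2.2.1, st.2.2.2) else st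
        let st := if PySem.Chars.islower char then (st.1, true, st.2.2.1, st.2.2.2) else st
        let st := if PySem.Chars.isdigit char then (st.1, st.2.1, true, st.2.2.2) else st
        let st := if pvIsSpecial char then (st.1, st.2.1, st.2.2.1, true) else st
        st)
      (u, l, d, s)
    = (u || cs.any (fun c => PySem.Chars.isupper c),
       l || cs.any (fun c => PySem.Chars.islower c),
       d || cs.any (fun c => PySem.Chars.isdigit c),
       s || cs.any (fun c => pvIsSpecial c)) := by
  induction cs generalizing u l d s with
  | nil => simp
  | cons c cs ih =>
    simp only [List.foldl_cons, List.any_cons]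
    rw [ih]
    by_cases hu : PySem.Chars.isupper c <;>
      by_cases hl : PySem.Chars.islower c <;>
        by_cases hd : PySem.Chars.isdigit c <;>
          by_cases hs : pvIsSpecial c <;>
            simp [hu, hl, hd, hs]

-- per password, A's sequential score equals B's flag-based score
theorem pvScore_eq (password : String) :
    (let cs := password.toList
     let score : Int := 0
     let score := if 8 ≤ cs.length ∧ cs.length < 64 then score + 1 else score
     let score := if cs.any (fun char => PySem.Chars.isupper char) then score + 1 else score
     let score := if cs.any (fun char => PySem.Chars.islower char) then score + 1 else score
     let score := if cs.any (fun char => PySem.Chars.isdigit char) then score + 1 else score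
     let score := if cs.any (fun char => pvIsSpecial char) then score + 1 else score
     score) = pvScoreOne password := by
  simp only [pvScoreOne, pvFlags_eq, Bool.false_or]
  split_ifs <;> omega

-- A's append-accumulating foldl is B's map, shifted by the accumulator
theorem pvA_eq_map (pd : List String) (acc : List (String × Int)) :
    pd.foldl (fun password_scores password =>
      let cs := password.toList
      let score : Int := 0
      let score := if 8 ≤ cs.length ∧ cs.length < 64 then score + 1 else score
      let score := if cs.any (fun char => PySem.Chars.isupper char) then score + 1 else score
      let score := if cs.any (fun char => PySem.Chars.islower char) then score + 1 else score
      let score := if cs.any (fun char => PySem.Chars.isdigit char) then score + 1 else score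
      let score := if cs.any (fun char => pvIsSpecial char) then score + 1 else score
      password_scores ++ [(password, score)]) acc
    = acc ++ pd.map (fun p => (p, pvScoreOne p)) := by
  induction pd generalizing acc with
  | nil => simp
  | cons p pd ih =>
    simp only [List.foldl_cons, List.map_cons]
    rw [ih]
    simp only [pvScore_eq, List.append_assoc, List.singleton_append]

-- ===== VERDICT (by name: the statement is the Claim_ definition above) =====
theorem check_password_rules_spec : Claim_equal_check_password_rules := by
  intro pd _
  unfold Spec_check_password_rules check_password_rules check_password_rules_alt
  rw [pvA_eq_map pd []]
  simp
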